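-- pv_equiv track=rewrite | github.com/AndreasDit/generAI | src/article_pipeline/idea_generator.py | _parse_ideas
-- ===== SOURCE A (Python) =====
-- from typing import Dict, List, Any, Optional
--
-- def _parse_ideas(content: str) -> List[Dict[str, str]]:
--     """Parse the generated ideas from the OpenAI response.
--
--     Args:
--         content: Raw text response from OpenAI
--
--     Returns:
--         List of parsed idea dictionaries
--     """
--     ideas = []
--     current_idea = {}
--
--     lines = content.strip().split("\n")
--     for line in lines:
--         line = line.strip()
--         if not line:
--             continue
--
--         if line == "---":
--             if current_idea:
--                 ideas.append(current_idea)
--                 current_idea = {}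
--             continue
--
--         if line.startswith("TITLE:"):
--             current_idea["title"] = line[6:].strip()
--         elif line.startswith("DESCRIPTION:"):
--             current_idea["description"] = line[12:].strip()
--         elif line.startswith("AUDIENCE:"):
--             current_idea["audience"] = line[9:].strip()
--         elif line.startswith("KEY_POINTS:"):
--             current_idea["key_points"] = line[11:].strip()
--         elif line.startswith("SOURCES:"):
--             current_idea["sources"] = line[8:].strip()
--         elif current_idea:
--             # Append to the last field
--             last_key = list(current_idea.keys())[-1]
--             current_idea[last_key] += "\n" + line
--
--     # Add the last idea if exists
--     if current_idea:
--         ideas.append(current_idea)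
--
--     return ideas
-- ===== SOURCE B (Python) =====
-- FIELDS = [
--     ("TITLE:", "title"),
--     ("DESCRIPTION:", "description"),
--     ("AUDIENCE:", "audience"),
--     ("KEY_POINTS:", "key_points"),
--     ("SOURCES:", "sources"),
-- ]
--
--
-- def _parse_ideas(content: str):
--     """Group-then-parse: first split the text into '---'-separated blocks of
--     stripped non-empty lines, then parse each block independently."""
--     # pass 1: blocks of lines
--     blocks = []
--     group = []
--     for raw in content.strip().split("\n"):
--         s = raw.strip()
--         if not s:
--             continue
--         if s == "---":
--             if group:
--                 blocks.append(group)
--                 group = []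
--         else:
--             group.append(s)
--     if group:
--         blocks.append(group)
--
--     # pass 2: parse each block into a dict
--     ideas = []
--     for grp in blocks:
--         idea = {}
--         for s in grp:
--             for prefix, key in FIELDS:
--                 if s.startswith(prefix):
--                     idea[key] = s[len(prefix):].strip()
--                     break
--             else:
--                 if idea:
--                     last_key = next(reversed(idea))
--                     idea[last_key] += "\n" + s
--         if idea:
--             ideas.append(idea)
--     return ideas
-- ===== Notes on version B (the rewrite author's own statement) =====
-- stated objective: alternative
-- what changed: A's single interleaved state machine (one loop juggling the ideas list, the current dict and the separator handling) is re-decomposed into two passes: first group the stripped non-empty lines into separator-delimited blocks, then parse each block independently into a dict via a prefix table, keeping blocks that yielded at least one field.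
import Mathlib
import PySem

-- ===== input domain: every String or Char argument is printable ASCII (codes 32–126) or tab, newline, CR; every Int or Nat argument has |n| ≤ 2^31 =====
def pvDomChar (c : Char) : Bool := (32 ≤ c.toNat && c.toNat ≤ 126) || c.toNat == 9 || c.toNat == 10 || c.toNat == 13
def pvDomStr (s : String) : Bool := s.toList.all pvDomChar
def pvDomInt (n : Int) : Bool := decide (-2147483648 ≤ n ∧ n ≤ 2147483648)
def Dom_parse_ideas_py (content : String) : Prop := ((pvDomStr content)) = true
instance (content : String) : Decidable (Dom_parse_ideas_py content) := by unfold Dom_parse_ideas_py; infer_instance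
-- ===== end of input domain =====

-- B re-decomposes A's single interleaved state machine into group-then-parse (split into
-- '---'-separated blocks first, then parse each block); same cost, objective: alternative.

-- ===== PORT A =====
-- one loop step of A's for-loop; state = (ideas so far, current_idea)
def pvAStep (st : List (List (String × String)) × PySem.Dict String String) (rawLine : String) :
    List (List (String × String)) × PySem.Dict String String :=
  let line := PySem.Str.strip rawLine
  if line = "" then st
  else if line = "---" then
    (if st.2.items.isEmpty then st else (st.1 ++ [st.2.items], PySem.Dict.empty))
  else if PySem.Str.startswith line "TITLE:" then
    (st.1, st.2.insert "title" (PySem.Str.strip (PySem.Str.slice line (some 6) none)))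
  else if PySem.Str.startswith line "DESCRIPTION:" then
    (st.1, st.2.insert "description" (PySem.Str.strip (PySem.Str.slice line (some 12) none)))
  else if PySem.Str.startswith line "AUDIENCE:" then
    (st.1, st.2.insert "audience" (PySem.Str.strip (PySem.Str.slice line (some 9) none)))
  else if PySem.Str.startswith line "KEY_POINTS:" then
    (st.1, st.2.insert "key_points" (PySem.Str.strip (PySem.Str.slice line (some 11) none)))
  else if PySem.Str.startswith line "SOURCES:" then
    (st.1, st.2.insert "sources" (PySem.Str.strip (PySem.Str.slice line (some 8) none)))
  else if st.2.items.isEmpty then st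
  else
    -- last_key = list(current_idea.keys())[-1]; guarded by 'elif current_idea', so keys ≠ []
    match PySem.List.pyGet? st.2.keys (-1) with
    | some k => (st.1, st.2.modify k "" (fun v => v ++ ("\n" ++ line)))
    | none => st

def parse_ideas_py (content : String) : List (List (String × String)) :=
  let lines := ((PySem.Str.split? (PySem.Str.strip content) "\n").getD [])
  let st := lines.foldl pvAStep ([], PySem.Dict.empty)
  if st.2.items.isEmpty then st.1 else st.1 ++ [st.2.items]

-- ===== PORT B =====
def pvFields : List (String × String) :=
  [("TITLE:", "title"), ("DESCRIPTION:", "description"), ("AUDIENCE:", "audience"),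
   ("KEY_POINTS:", "key_points"), ("SOURCES:", "sources")]

-- parse one (already stripped, non-empty, non-'---') line of a block
def pvParseLine (idea : PySem.Dict String String) (s : String) : PySem.Dict String String :=
  match pvFields.find? (fun p => PySem.Str.startswith s p.1) with
  | some p => idea.insert p.2 (PySem.Str.strip (PySem.Str.slice s (some (PySem.Str.len p.1)) none))
  | none =>
    if idea.items.isEmpty then idea
    else
      match idea.keys.getLast? with
      | some k => idea.modify k "" (fun v => v ++ ("\n" ++ s))
      | none => idea

def pvParseBlock (grp : List String) : PySem.Dict String String :=
  grp.foldl pvParseLine PySem.Dict.empty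

-- pass 1: group the stripped non-empty lines into '---'-separated blocks
def pvSplitStep (st : List (List String) × List String) (raw : String) :
    List (List String) × List String :=
  let s := PySem.Str.strip raw
  if s = "" then st
  else if s = "---" then (if st.2.isEmpty then st else (st.1 ++ [st.2], []))
  else (st.1, st.2 ++ [s])

def pvBlocks (content : String) : List (List String) :=
  let st := ((PySem.Str.split? (PySem.Str.strip content) "\n").getD []).foldl pvSplitStep ([], [])
  if st.2.isEmpty then st.1 else st.1 ++ [st.2]

-- pass 2: parse the blocks, keeping those that produced at least one field
def parse_ideas_py_alt (content : String) : List (List (String × String)) :=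
  (pvBlocks content).foldl
    (fun acc grp =>
      let d := pvParseBlock grp
      if d.items.isEmpty then acc else acc ++ [d.items]) []

-- ===== PRECONDITION & SPEC =====
def Spec_parse_ideas_py (content : String) (out : List (List (String × String))) : Prop := out = parse_ideas_py_alt content
instance (content : String) (out : List (List (String × String))) : Decidable (Spec_parse_ideas_py content out) := by unfold Spec_parse_ideas_py; infer_instance

-- ===== CLAIM (what is proved, stated in full; the proofs are below) =====
def Claim_equal_parse_ideas_py : Prop := ∀ (content : String), Dom_parse_ideas_py content → Spec_parse_ideas_py content (parse_ideas_py content)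

-- ===== LEMMAS AND PROOFS =====

-- A's per-line field update equals B's table-driven one (on stripped non-trivial lines)
lemma pvGetNegOne {α : Type} (l : List α) : PySem.List.pyGet? l (-1) = l.getLast? := by
  simp [PySem.List.pyGet?, PySem.List.pyIdx?, List.getLast?_eq_getElem?]
  split_ifs with h
  · simp
  · have : l = [] := by cases l <;> simp_all
    simp [this]

lemma pvAStep_line (acc : List (List (String × String))) (d : PySem.Dict String String)
    (s : String) (h0 : PySem.Str.strip s ≠ "") (h1 : PySem.Str.strip s ≠ "---") :
    pvAStep (acc, d) s = (acc, pvParseLine d (PySem.Str.strip s)) := by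
  have e1 : PySem.Str.len "TITLE:" = (6 : Int) := by decide
  have e2 : PySem.Str.len "DESCRIPTION:" = (12 : Int) := by decide
  have e3 : PySem.Str.len "AUDIENCE:" = (9 : Int) := by decide
  have e4 : PySem.Str.len "KEY_POINTS:" = (11 : Int) := by decide
  have e5 : PySem.Str.len "SOURCES:" = (8 : Int) := by decide
  unfold pvAStep pvParseLine pvFields
  dsimp only
  rw [if_neg h0, if_neg h1, pvGetNegOne]
  simp only [List.find?]
  cases hT : PySem.Str.startswith (PySem.Str.strip s) "TITLE:" <;>
  cases hD : PySem.Str.startswith (PySem.Str.strip s) "DESCRIPTION:" <;>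
  cases hA : PySem.Str.startswith (PySem.Str.strip s) "AUDIENCE:" <;>
  cases hK : PySem.Str.startswith (PySem.Str.strip s) "KEY_POINTS:" <;>
  cases hS : PySem.Str.startswith (PySem.Str.strip s) "SOURCES:" <;>
    simp [hT, hD, hA, hK, hS, e1, e2, e3, e4, e5] <;> split_ifs <;> try rfl
  cases d.keys.getLast? <;> rfl

-- the step functions only append to their accumulator component
lemma pvAStep_acc (acc : List (List (String × String))) (d : PySem.Dict String String) (l : String) :
    pvAStep (acc, d) l = (acc ++ (pvAStep ([], d) l).1, (pvAStep ([], d) l).2) := by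
  unfold pvAStep; dsimp only
  split_ifs <;> try simp
  cases PySem.List.pyGet? d.keys (-1) <;> simp

lemma pvSplitStep_acc (acc : List (List String)) (g : List String) (l : String) :
    pvSplitStep (acc, g) l = (acc ++ (pvSplitStep ([], g) l).1, (pvSplitStep ([], g) l).2) := by
  unfold pvSplitStep; dsimp only
  split_ifs <;> simp

-- hence both folds only append to their first component
lemma pvAFold_norm (lines : List String) (st : List (List (String × String)) × PySem.Dict String String) :
    lines.foldl pvAStep st
      = (st.1 ++ (lines.foldl pvAStep ([], st.2)).1, (lines.foldl pvAStep ([], st.2)).2) := by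
  induction lines generalizing st with
  | nil => simp
  | cons l rest ih =>
    obtain ⟨acc, d⟩ := st
    rw [List.foldl_cons, List.foldl_cons, ih (pvAStep (acc, d) l), ih (pvAStep ([], d) l),
        pvAStep_acc acc d l, pvAStep_acc [] d l]
    simp

lemma pvSplitFold_norm (lines : List String) (st : List (List String) × List String) :
    lines.foldl pvSplitStep st
      = (st.1 ++ (lines.foldl pvSplitStep ([], st.2)).1, (lines.foldl pvSplitStep ([], st.2)).2) := by
  induction lines generalizing st with
  | nil => simp
  | cons l rest ih =>
    obtain ⟨acc, g⟩ := st
    rw [List.foldl_cons, List.foldl_cons, ih (pvSplitStep (acc, g) l), ih (pvSplitStep ([], g) l),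
        pvSplitStep_acc acc g l, pvSplitStep_acc [] g l]
    simp

-- B's emit pass is a filterMap
def pvEmit (bs : List (List String)) : List (List (String × String)) :=
  bs.foldl (fun acc grp =>
    let d := pvParseBlock grp
    if d.items.isEmpty then acc else acc ++ [d.items]) []

lemma pvEmit_from (bs : List (List String)) (acc : List (List (String × String))) :
    bs.foldl (fun acc grp =>
      let d := pvParseBlock grp
      if d.items.isEmpty then acc else acc ++ [d.items]) acc
    = acc ++ bs.filterMap (fun grp =>
        if (pvParseBlock grp).items.isEmpty then none else some (pvParseBlock grp).items) := by
  induction bs generalizing acc with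
  | nil => simp
  | cons b rest ih =>
    rw [List.foldl_cons, ih, List.filterMap_cons]
    dsimp only
    by_cases h : (pvParseBlock b).items = [] <;> simp [h]

lemma pvEmit_eq (bs : List (List String)) :
    pvEmit bs = bs.filterMap (fun grp =>
      if (pvParseBlock grp).items.isEmpty then none else some (pvParseBlock grp).items) := by
  simpa [pvEmit] using pvEmit_from bs []

-- suffix views of the two programs
def pvF (lines : List String) (d : PySem.Dict String String) : List (List (String × String)) :=
  let st := lines.foldl pvAStep ([], d)
  if st.2.items.isEmpty then st.1 else st.1 ++ [st.2.items]

def pvG (lines : List String) (g : List String) : List (List (String × String)) :=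
  let st := lines.foldl pvSplitStep ([], g)
  pvEmit (if st.2.isEmpty then st.1 else st.1 ++ [st.2])

-- peeling one line off the suffix views
lemma pvF_cons (l : String) (rest : List String) (d : PySem.Dict String String) :
    pvF (l :: rest) d = (pvAStep ([], d) l).1 ++ pvF rest (pvAStep ([], d) l).2 := by
  unfold pvF
  rw [List.foldl_cons, pvAFold_norm rest (pvAStep ([], d) l)]
  by_cases h : ((rest.foldl pvAStep ([], (pvAStep ([], d) l).2)).2).items = [] <;> simp [h]

lemma pvG_cons (l : String) (rest : List String) (g : List String) :
    pvG (l :: rest) g = pvEmit (pvSplitStep ([], g) l).1 ++ pvG rest (pvSplitStep ([], g) l).2 := by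
  unfold pvG
  rw [List.foldl_cons, pvSplitFold_norm rest (pvSplitStep ([], g) l)]
  by_cases h : ((rest.foldl pvSplitStep ([], (pvSplitStep ([], g) l).2)).2) = [] <;>
    simp [h, pvEmit_eq, List.filterMap_append]

lemma pvParseBlock_snoc (g : List String) (t : String) :
    pvParseBlock (g ++ [t]) = pvParseLine (pvParseBlock g) t := by
  simp [pvParseBlock, List.foldl_append]

lemma pvMain (lines : List String) (g : List String) :
    pvF lines (pvParseBlock g) = pvG lines g := by
  induction lines generalizing g with
  | nil =>
    unfold pvF pvG
    simp only [List.foldl_nil]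
    by_cases hg : g = []
    · subst hg; simp [pvEmit, pvParseBlock, PySem.Dict.empty]
    · simp [hg, pvEmit_eq]
      by_cases hi : (pvParseBlock g).items = [] <;> simp [hi]
  | cons l rest ih =>
    rw [pvF_cons, pvG_cons]
    by_cases h0 : PySem.Str.strip l = ""
    · have sA : pvAStep ([], pvParseBlock g) l = ([], pvParseBlock g) := by
        unfold pvAStep; simp [h0]
      have sS : pvSplitStep ([], g) l = ([], g) := by
        unfold pvSplitStep; simp [h0]
      rw [sA, sS]
      simpa [pvEmit] using ih g
    by_cases h1 : PySem.Str.strip l = "---"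
    · by_cases hi : (pvParseBlock g).items = []
      · have sA : pvAStep ([], pvParseBlock g) l = ([], pvParseBlock g) := by
          unfold pvAStep; simp [h0, h1, hi]
        have hPB : pvParseBlock g = PySem.Dict.empty := PySem.Dict.ext (by simpa using hi)
        by_cases hg : g = []
        · subst hg
          have sS : pvSplitStep ([], ([] : List String)) l = ([], []) := by
            unfold pvSplitStep; simp [h0, h1]
          rw [sA, sS, hPB]
          simpa [pvEmit, pvParseBlock] using ih []
        · have sS : pvSplitStep ([], g) l = ([g], []) := by
            unfold pvSplitStep; simp [h0, h1, hg]
          rw [sA, sS, hPB]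
          have : pvEmit [g] = [] := by simp [pvEmit, hi]
          simpa [this, pvParseBlock] using ih []
      · have hg : g ≠ [] := by
          intro h; rw [h] at hi; exact hi rfl
        have sA : pvAStep ([], pvParseBlock g) l
            = ([(pvParseBlock g).items], PySem.Dict.empty) := by
          unfold pvAStep; simp [h0, h1, hi]
        have sS : pvSplitStep ([], g) l = ([g], []) := by
          unfold pvSplitStep; simp [h0, h1, hg]
        rw [sA, sS]
        have : pvEmit [g] = [(pvParseBlock g).items] := by simp [pvEmit, hi]
        simpa [this, pvParseBlock] using ih []
    · have sA : pvAStep ([], pvParseBlock g) l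
          = ([], pvParseLine (pvParseBlock g) (PySem.Str.strip l)) := pvAStep_line [] _ l h0 h1
      have sS : pvSplitStep ([], g) l = ([], g ++ [PySem.Str.strip l]) := by
        unfold pvSplitStep; simp [h0, h1]
      rw [sA, sS, ← pvParseBlock_snoc]
      simpa [pvEmit] using ih (g ++ [PySem.Str.strip l])

-- ===== VERDICT (by name: the statement is the Claim_ definition above) =====
theorem parse_ideas_py_spec : Claim_equal_parse_ideas_py := by
  intro content _
  show parse_ideas_py content = parse_ideas_py_alt content
  have h := pvMain ((PySem.Str.split? (PySem.Str.strip content) "\n").getD []) []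
  rw [show pvParseBlock [] = PySem.Dict.empty from rfl] at h
  unfold pvF pvG pvEmit at h
  unfold parse_ideas_py parse_ideas_py_alt pvBlocks
  exact h
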